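-- pv_equiv track=rewrite | github.com/shuichi/RenjuTransformer | renju-mtcs.py | line_points_through
-- ===== SOURCE A (Python) =====
-- BOARD_SIZE = 15
--
-- def idx_to_rc(index: int) -> tuple[int, int]:
--     return divmod(index, BOARD_SIZE)
--
-- def rc_to_idx(row: int, col: int) -> int:
--     return row * BOARD_SIZE + col
--
-- def inside(row: int, col: int) -> bool:
--     return 0 <= row < BOARD_SIZE and 0 <= col < BOARD_SIZE
--
-- def line_points_through(index: int, dr: int, dc: int) -> tuple[list[int], int]:
--     row, col = idx_to_rc(index)
--     move_row, move_col = row, col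
--     while inside(row - dr, col - dc):
--         row -= dr
--         col -= dc
--
--     points: list[int] = []
--     move_pos = 0
--     while inside(row, col):
--         if row == move_row and col == move_col:
--             move_pos = len(points)
--         points.append(rc_to_idx(row, col))
--         row += dr
--         col += dc
--     return points, move_pos
-- ===== SOURCE B (Python) =====
-- BOARD_SIZE = 15
--
-- def line_points_through(index, dr, dc):
--     row, col = divmod(index, BOARD_SIZE)
--     back = []
--     r, c = row - dr, col - dc
--     while 0 <= r < BOARD_SIZE and 0 <= c < BOARD_SIZE:
--         back.append(r * BOARD_SIZE + c)
--         r -= dr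
--         c -= dc
--     back.reverse()
--     fwd = []
--     r, c = row, col
--     while 0 <= r < BOARD_SIZE and 0 <= c < BOARD_SIZE:
--         fwd.append(r * BOARD_SIZE + c)
--         r += dr
--         c += dc
--     return back + fwd, (len(back) if fwd else 0)
-- ===== Notes on version B (the rewrite author's own statement) =====
-- stated objective: alternative
-- what changed: B builds the line by expanding outward from the move cell (a backward collection loop reversed, then a forward collection loop), instead of A's rewind-to-start loop followed by a single scan with a per-cell equality test against the move cell; move_pos falls out as the backward count.
import Mathlib
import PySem

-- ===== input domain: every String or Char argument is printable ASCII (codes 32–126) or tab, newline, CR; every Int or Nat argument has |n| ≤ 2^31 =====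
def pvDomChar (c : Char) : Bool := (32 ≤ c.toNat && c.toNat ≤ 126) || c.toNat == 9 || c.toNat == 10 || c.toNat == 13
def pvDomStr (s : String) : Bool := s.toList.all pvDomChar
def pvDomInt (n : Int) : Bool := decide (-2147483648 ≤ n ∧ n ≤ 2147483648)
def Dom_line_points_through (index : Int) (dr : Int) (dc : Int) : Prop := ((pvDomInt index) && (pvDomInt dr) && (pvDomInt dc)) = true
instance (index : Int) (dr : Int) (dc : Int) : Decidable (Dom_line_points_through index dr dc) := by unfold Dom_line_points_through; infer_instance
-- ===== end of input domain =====

-- B re-implements the line collection by expanding outward from the move cell in both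
-- directions (backward list reversed ++ forward list), so no per-step equality test
-- against the move cell is needed; objective: alternative decomposition, same cost.

-- ===== PORT A =====
-- Python's inside(row, col)
def pvInside (r c : Int) : Bool := decide (0 ≤ r) && decide (r < 15) && decide (0 ≤ c) && decide (c < 15)

-- A's first while loop (walk back to the start of the line); fuel 16 is enough for every
-- input A terminates on (the changing coordinate stays in [0,15), so ≤ 15 iterations).
def pvBackA (dr dc : Int) : Nat → Int → Int → Int × Int
  | 0, r, c => (r, c)
  | f+1, r, c => if pvInside (r - dr) (c - dc) then pvBackA dr dc f (r - dr) (c - dc) else (r, c)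

-- A's second while loop (collect points, tracking move_pos), fuel-bounded likewise.
def pvFwdA (dr dc mr mc : Int) : Nat → Int → Int → List Int → Int → List Int × Int
  | 0, _, _, pts, mp => (pts, mp)
  | f+1, r, c, pts, mp =>
    if pvInside r c then
      pvFwdA dr dc mr mc f (r + dr) (c + dc) (pts ++ [r * 15 + c])
        (if r = mr ∧ c = mc then (pts.length : Int) else mp)
    else (pts, mp)

def line_points_through (index : Int) (dr : Int) (dc : Int) : List Int × Int :=
  let row := PySem.Int.floordiv index 15
  let col := PySem.Int.mod index 15
  let rc := pvBackA dr dc 16 row col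
  pvFwdA dr dc row col 16 rc.1 rc.2 [] 0

-- ===== PORT B =====
-- B's backward loop: collect indices stepping by (-dr,-dc) while inside.
def pvBackB (dr dc : Int) : Nat → Int → Int → List Int → List Int
  | 0, _, _, acc => acc
  | f+1, r, c, acc => if pvInside r c then pvBackB dr dc f (r - dr) (c - dc) (acc ++ [r * 15 + c]) else acc

-- B's forward loop: collect indices stepping by (dr,dc) while inside.
def pvFwdB (dr dc : Int) : Nat → Int → Int → List Int → List Int
  | 0, _, _, acc => acc
  | f+1, r, c, acc => if pvInside r c then pvFwdB dr dc f (r + dr) (c + dc) (acc ++ [r * 15 + c]) else acc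

def line_points_through_alt (index : Int) (dr : Int) (dc : Int) : List Int × Int :=
  let row := PySem.Int.floordiv index 15
  let col := PySem.Int.mod index 15
  let back := (pvBackB dr dc 16 (row - dr) (col - dc) []).reverse
  let fwd := pvFwdB dr dc 16 row col []
  (back ++ fwd, if fwd.isEmpty then 0 else (back.length : Int))

-- ===== PRECONDITION & SPEC =====
-- Pre_ excludes exactly the inputs on which Python A never returns: with dr = dc = 0 and
-- the move cell on the board, A's first while loop spins forever (B's backward loop too).
def Pre_line_points_through (index : Int) (dr : Int) (dc : Int) : Prop :=
  ¬ (dr = 0 ∧ dc = 0 ∧ 0 ≤ index ∧ index < 225)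
instance (index : Int) (dr : Int) (dc : Int) : Decidable (Pre_line_points_through index dr dc) := by unfold Pre_line_points_through; infer_instance

def pvWitness_line_points_through : Int × Int × Int := (112, 1, 1)

def Spec_line_points_through (index : Int) (dr : Int) (dc : Int) (out : List Int × Int) : Prop := out = line_points_through_alt index dr dc
instance (index : Int) (dr : Int) (dc : Int) (out : List Int × Int) : Decidable (Spec_line_points_through index dr dc out) := by unfold Spec_line_points_through; infer_instance

-- ===== CLAIM (what is proved, stated in full; the proofs are below) =====
def Claim_equal_line_points_through : Prop := ∀ (index : Int) (dr : Int) (dc : Int), Dom_line_points_through index dr dc → Pre_line_points_through index dr dc → Spec_line_points_through index dr dc (line_points_through index dr dc)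

-- ===== LEMMAS AND PROOFS =====

-- closed form of pvBackA: if the guard first fails after m iterations, and fuel > m
theorem pvBackA_closed (dr dc : Int) : ∀ (m : Nat) (f : Nat) (r c : Int),
    (∀ j : Nat, j < m → pvInside (r - (↑j + 1) * dr) (c - (↑j + 1) * dc) = true) →
    pvInside (r - (↑m + 1) * dr) (c - (↑m + 1) * dc) = false →
    m < f →
    pvBackA dr dc f r c = (r - ↑m * dr, c - ↑m * dc) := by
  intro m
  induction m with
  | zero =>
    intro f r c _ hexit hf
    obtain ⟨f', rfl⟩ : ∃ f', f = f' + 1 := ⟨f - 1, by omega⟩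
    have h0 : pvInside (r - dr) (c - dc) = false := by
      have h := hexit; norm_num at h; exact h
    simp [pvBackA, h0]
  | succ m ih =>
    intro f r c hin hexit hf
    obtain ⟨f', rfl⟩ : ∃ f', f = f' + 1 := ⟨f - 1, by omega⟩
    have h0 : pvInside (r - dr) (c - dc) = true := by
      have h := hin 0 (by omega); norm_num at h; exact h
    have hrec := ih f' (r - dr) (c - dc)
      (by
        intro j hj
        have h := hin (j + 1) (by omega)
        have e1 : r - dr - (↑j + 1) * dr = r - (↑(j + 1) + 1) * dr := by push_cast; ring
        have e2 : c - dc - (↑j + 1) * dc = c - (↑(j + 1) + 1) * dc := by push_cast; ring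
        rw [e1, e2]; exact h)
      (by
        have e1 : r - dr - (↑m + 1) * dr = r - (↑(m + 1) + 1) * dr := by push_cast; ring
        have e2 : c - dc - (↑m + 1) * dc = c - (↑(m + 1) + 1) * dc := by push_cast; ring
        rw [e1, e2]; exact hexit)
      (by omega)
    simp only [pvBackA, h0, if_true]
    rw [hrec]
    simp only [Prod.mk.injEq]
    constructor <;> (push_cast; ring)

-- closed form of pvBackB
theorem pvBackB_closed (dr dc : Int) : ∀ (m : Nat) (f : Nat) (r c : Int) (acc : List Int),
    (∀ j : Nat, j < m → pvInside (r - ↑j * dr) (c - ↑j * dc) = true) →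
    pvInside (r - ↑m * dr) (c - ↑m * dc) = false →
    m < f →
    pvBackB dr dc f r c acc = acc ++ (List.range m).map (fun j => (r - ↑j * dr) * 15 + (c - ↑j * dc)) := by
  intro m
  induction m with
  | zero =>
    intro f r c acc _ hexit hf
    obtain ⟨f', rfl⟩ : ∃ f', f = f' + 1 := ⟨f - 1, by omega⟩
    have h0 : pvInside r c = false := by have h := hexit; norm_num at h; exact h
    simp [pvBackB, h0]
  | succ m ih =>
    intro f r c acc hin hexit hf
    obtain ⟨f', rfl⟩ : ∃ f', f = f' + 1 := ⟨f - 1, by omega⟩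
    have h0 : pvInside r c = true := by have h := hin 0 (by omega); norm_num at h; exact h
    simp only [pvBackB, h0, if_true]
    rw [ih f' (r - dr) (c - dc) (acc ++ [r * 15 + c])
      (by
        intro j hj
        have h := hin (j + 1) (by omega)
        have e1 : r - dr - ↑j * dr = r - ↑(j + 1) * dr := by push_cast; ring
        have e2 : c - dc - ↑j * dc = c - ↑(j + 1) * dc := by push_cast; ring
        rw [e1, e2]; exact h)
      (by
        have e1 : r - dr - ↑m * dr = r - ↑(m + 1) * dr := by push_cast; ring
        have e2 : c - dc - ↑m * dc = c - ↑(m + 1) * dc := by push_cast; ring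
        rw [e1, e2]; exact hexit)
      (by omega)]
    have hmap : List.map ((fun j : Nat => (r - ↑j * dr) * 15 + (c - ↑j * dc)) ∘ Nat.succ) (List.range m)
        = List.map (fun j : Nat => (r - dr - ↑j * dr) * 15 + (c - dc - ↑j * dc)) (List.range m) := by
      refine List.map_congr_left (fun j hj => ?_)
      simp only [Function.comp_apply]
      push_cast; ring
    rw [List.range_succ_eq_map, List.map_cons, List.map_map, hmap]
    simp [List.append_assoc]

-- closed form of pvFwdB
theorem pvFwdB_closed (dr dc : Int) : ∀ (m : Nat) (f : Nat) (r c : Int) (acc : List Int),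
    (∀ j : Nat, j < m → pvInside (r + ↑j * dr) (c + ↑j * dc) = true) →
    pvInside (r + ↑m * dr) (c + ↑m * dc) = false →
    m < f →
    pvFwdB dr dc f r c acc = acc ++ (List.range m).map (fun j => (r + ↑j * dr) * 15 + (c + ↑j * dc)) := by
  intro m
  induction m with
  | zero =>
    intro f r c acc _ hexit hf
    obtain ⟨f', rfl⟩ : ∃ f', f = f' + 1 := ⟨f - 1, by omega⟩
    have h0 : pvInside r c = false := by have h := hexit; norm_num at h; exact h
    simp [pvFwdB, h0]
  | succ m ih =>
    intro f r c acc hin hexit hf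
    obtain ⟨f', rfl⟩ : ∃ f', f = f' + 1 := ⟨f - 1, by omega⟩
    have h0 : pvInside r c = true := by have h := hin 0 (by omega); norm_num at h; exact h
    simp only [pvFwdB, h0, if_true]
    rw [ih f' (r + dr) (c + dc) (acc ++ [r * 15 + c])
      (by
        intro j hj
        have h := hin (j + 1) (by omega)
        have e1 : r + dr + ↑j * dr = r + ↑(j + 1) * dr := by push_cast; ring
        have e2 : c + dc + ↑j * dc = c + ↑(j + 1) * dc := by push_cast; ring
        rw [e1, e2]; exact h)
      (by
        have e1 : r + dr + ↑m * dr = r + ↑(m + 1) * dr := by push_cast; ring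
        have e2 : c + dc + ↑m * dc = c + ↑(m + 1) * dc := by push_cast; ring
        rw [e1, e2]; exact hexit)
      (by omega)]
    have hmap : List.map ((fun j : Nat => (r + ↑j * dr) * 15 + (c + ↑j * dc)) ∘ Nat.succ) (List.range m)
        = List.map (fun j : Nat => (r + dr + ↑j * dr) * 15 + (c + dc + ↑j * dc)) (List.range m) := by
      refine List.map_congr_left (fun j hj => ?_)
      simp only [Function.comp_apply]
      push_cast; ring
    rw [List.range_succ_eq_map, List.map_cons, List.map_map, hmap]
    simp [List.append_assoc]

-- closed form of pvFwdA (points plus the move_pos fold)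
theorem pvFwdA_closed (dr dc mr mc : Int) : ∀ (m : Nat) (f : Nat) (r c : Int) (acc : List Int) (mp : Int),
    (∀ j : Nat, j < m → pvInside (r + ↑j * dr) (c + ↑j * dc) = true) →
    pvInside (r + ↑m * dr) (c + ↑m * dc) = false →
    m < f →
    pvFwdA dr dc mr mc f r c acc mp =
      (acc ++ (List.range m).map (fun j => (r + ↑j * dr) * 15 + (c + ↑j * dc)),
       (List.range m).foldl (fun (a : Int) (j : Nat) => if r + (j : Int) * dr = mr ∧ c + (j : Int) * dc = mc then ((acc.length : Int) + (j : Int)) else a) mp) := by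
  intro m
  induction m with
  | zero =>
    intro f r c acc mp _ hexit hf
    obtain ⟨f', rfl⟩ : ∃ f', f = f' + 1 := ⟨f - 1, by omega⟩
    have h0 : pvInside r c = false := by have h := hexit; norm_num at h; exact h
    simp [pvFwdA, h0]
  | succ m ih =>
    intro f r c acc mp hin hexit hf
    obtain ⟨f', rfl⟩ : ∃ f', f = f' + 1 := ⟨f - 1, by omega⟩
    have h0 : pvInside r c = true := by have h := hin 0 (by omega); norm_num at h; exact h
    simp only [pvFwdA, h0, if_true]
    rw [ih f' (r + dr) (c + dc) (acc ++ [r * 15 + c]) (if r = mr ∧ c = mc then ((acc.length : Int)) else mp)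
      (by
        intro j hj
        have h := hin (j + 1) (by omega)
        have e1 : r + dr + ↑j * dr = r + ↑(j + 1) * dr := by push_cast; ring
        have e2 : c + dc + ↑j * dc = c + ↑(j + 1) * dc := by push_cast; ring
        rw [e1, e2]; exact h)
      (by
        have e1 : r + dr + ↑m * dr = r + ↑(m + 1) * dr := by push_cast; ring
        have e2 : c + dc + ↑m * dc = c + ↑(m + 1) * dc := by push_cast; ring
        rw [e1, e2]; exact hexit)
      (by omega)]
    simp only [Prod.mk.injEq]
    constructor
    · have hmap : List.map ((fun j : Nat => (r + ↑j * dr) * 15 + (c + ↑j * dc)) ∘ Nat.succ) (List.range m)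
          = List.map (fun j : Nat => (r + dr + ↑j * dr) * 15 + (c + dc + ↑j * dc)) (List.range m) := by
        refine List.map_congr_left (fun j hj => ?_)
        simp only [Function.comp_apply]
        push_cast; ring
      rw [List.range_succ_eq_map, List.map_cons, List.map_map, hmap]
      simp [List.append_assoc]
    · rw [List.range_succ_eq_map, List.foldl_cons, List.foldl_map]
      have hfun : (fun (a : Int) (j : Nat) => if r + ↑(Nat.succ j) * dr = mr ∧ c + ↑(Nat.succ j) * dc = mc then ((acc.length : Int) + ↑(Nat.succ j)) else a)
          = (fun (a : Int) (j : Nat) => if r + dr + ↑j * dr = mr ∧ c + dc + ↑j * dc = mc then (((acc ++ [r * 15 + c]).length : Int) + ↑j) else a) := by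
        funext a j
        have e1 : r + (↑(Nat.succ j) : Int) * dr = r + dr + ↑j * dr := by push_cast; ring
        have e2 : c + (↑(Nat.succ j) : Int) * dc = c + dc + ↑j * dc := by push_cast; ring
        have e3 : ((acc.length : Int) + ↑(Nat.succ j)) = ((acc ++ [r * 15 + c]).length : Int) + ↑j := by
          simp only [List.length_append, List.length_cons, List.length_nil]
          push_cast
          ring
        rw [e1, e2, e3]
      rw [hfun]
      congr 1
      norm_num

theorem foldl_pick (n : Nat) (v : Nat → Int) : ∀ (M : Nat) (init : Int),
    List.foldl (fun a j => if j = n then v j else a) init (List.range M) = if n < M then v n else init := by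
  intro M
  induction M with
  | zero => intro init; simp
  | succ M ih =>
    intro init
    rw [List.range_succ, List.foldl_append, ih]
    simp only [List.foldl_cons, List.foldl_nil]
    by_cases h : M = n
    · subst h; simp
    · rw [if_neg h]
      by_cases h2 : n < M
      · rw [if_pos h2, if_pos (by omega)]
      · rw [if_neg h2, if_neg (by omega)]

theorem mul_window (a : Nat) (d : Int) (h15 : 15 ≤ a) (h1 : -15 < (a : Int) * d) (h2 : (a : Int) * d < 15) : d = 0 := by
  have ha : (15 : Int) ≤ (a : Int) := by exact_mod_cast h15
  rcases lt_trichotomy d 0 with h | h | h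
  · nlinarith
  · exact h
  · nlinarith

-- ===== VERDICT (by name: the statement is the Claim_ definition above) =====
-- A's points list from the line start equals B's reversed-back ++ forward list
theorem split_range_map (dr dc r0 c0 : Int) (n m : Nat) :
    (List.range (n + m)).map (fun j : Nat => ((r0 - ↑n * dr) + ↑j * dr) * 15 + ((c0 - ↑n * dc) + ↑j * dc))
      = ((List.range n).map (fun j : Nat => ((r0 - dr) - ↑j * dr) * 15 + ((c0 - dc) - ↑j * dc))).reverse
        ++ (List.range m).map (fun j : Nat => (r0 + ↑j * dr) * 15 + (c0 + ↑j * dc)) := by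
  refine List.ext_getElem (by simp) ?_
  intro i h1 h2
  simp only [List.getElem_map, List.getElem_range]
  rcases lt_or_ge i n with hi | hi
  · rw [List.getElem_append_left (by simpa using hi)]
    rw [List.getElem_reverse]
    simp only [List.getElem_map, List.getElem_range, List.length_map, List.length_range]
    have e1 : ((n - 1 - i : Nat) : Int) = (n : Int) - 1 - (i : Int) := by omega
    rw [e1]; ring
  · rw [List.getElem_append_right (by simpa using hi)]
    simp only [List.getElem_map, List.getElem_range, List.length_map, List.length_range, List.length_reverse]
    have e1 : ((i - n : Nat) : Int) = (i : Int) - (n : Int) := by omega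
    rw [e1]; ring

theorem line_points_through_spec : Claim_equal_line_points_through := by
  intro index dr dc hdom hpre
  unfold Spec_line_points_through line_points_through line_points_through_alt
  simp only []
  set r0 := PySem.Int.floordiv index 15 with hr0
  set c0 := PySem.Int.mod index 15 with hc0
  have hcm : c0 = index % 15 := by rw [hc0, PySem.Int.mod_eq_emod_of_pos (by norm_num)]
  have hc1 : 0 ≤ c0 := by rw [hcm]; exact Int.emod_nonneg index (by norm_num)
  have hc2 : c0 < 15 := by rw [hcm]; exact Int.emod_lt_of_pos index (by norm_num)
  have hix : r0 * 15 + c0 = index := PySem.Int.floordiv_mul_add_mod index 15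
  -- existence of a backward exit step j ≤ 15 and a forward exit step j ≤ 15
  have hPex15 : ∃ j : Nat, j ≤ 15 ∧ pvInside (r0 - ((j : Int) + 1) * dr) (c0 - ((j : Int) + 1) * dc) = false := by
    rcases hb0 : pvInside (r0 - ((0 : Int) + 1) * dr) (c0 - ((0 : Int) + 1) * dc) with _ | _
    · exact ⟨0, by norm_num, by simpa using hb0⟩
    rcases hb15 : pvInside (r0 - ((15 : Int) + 1) * dr) (c0 - ((15 : Int) + 1) * dc) with _ | _
    · exact ⟨15, by norm_num, by simpa using hb15⟩
    exfalso
    simp only [pvInside, Bool.and_eq_true, decide_eq_true_eq] at hb0 hb15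
    -- the step must be (0,0), and then the move cell is on the board: contradiction with Pre_
    have hdr : dr = 0 := by omega
    have hdc : dc = 0 := by omega
    exact hpre ⟨hdr, hdc, by omega, by omega⟩
  have hQex15 : ∃ j : Nat, j ≤ 15 ∧ pvInside (r0 + (j : Int) * dr) (c0 + (j : Int) * dc) = false := by
    rcases hb0 : pvInside (r0 + (0 : Int) * dr) (c0 + (0 : Int) * dc) with _ | _
    · exact ⟨0, by norm_num, by simpa using hb0⟩
    rcases hb15 : pvInside (r0 + (15 : Int) * dr) (c0 + (15 : Int) * dc) with _ | _
    · exact ⟨15, by norm_num, by simpa using hb15⟩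
    exfalso
    simp only [pvInside, Bool.and_eq_true, decide_eq_true_eq] at hb0 hb15
    have hdr : dr = 0 := by omega
    have hdc : dc = 0 := by omega
    exact hpre ⟨hdr, hdc, by omega, by omega⟩
  have hPex : ∃ j : Nat, pvInside (r0 - ((j : Int) + 1) * dr) (c0 - ((j : Int) + 1) * dc) = false := by
    obtain ⟨j, _, hj⟩ := hPex15; exact ⟨j, by exact_mod_cast hj⟩
  have hQex : ∃ j : Nat, pvInside (r0 + (j : Int) * dr) (c0 + (j : Int) * dc) = false := by
    obtain ⟨j, _, hj⟩ := hQex15; exact ⟨j, by exact_mod_cast hj⟩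
  set n := Nat.find hPex with hn
  set m := Nat.find hQex with hm
  have hn_exit : pvInside (r0 - ((n : Int) + 1) * dr) (c0 - ((n : Int) + 1) * dc) = false := Nat.find_spec hPex
  have hm_exit : pvInside (r0 + (m : Int) * dr) (c0 + (m : Int) * dc) = false := Nat.find_spec hQex
  have hn_min : ∀ j : Nat, j < n → pvInside (r0 - ((j : Int) + 1) * dr) (c0 - ((j : Int) + 1) * dc) = true := by
    intro j hj
    have h := Nat.find_min hPex hj
    simpa using h
  have hm_min : ∀ j : Nat, j < m → pvInside (r0 + (j : Int) * dr) (c0 + (j : Int) * dc) = true := by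
    intro j hj
    have h := Nat.find_min hQex hj
    simpa using h
  have hn15 : n ≤ 15 := by
    obtain ⟨j, hj15, hj⟩ := hPex15
    exact le_trans (Nat.find_min' hPex (by exact_mod_cast hj)) hj15
  have hm15 : m ≤ 15 := by
    obtain ⟨j, hj15, hj⟩ := hQex15
    exact le_trans (Nat.find_min' hQex (by exact_mod_cast hj)) hj15
  -- the whole walk has at most 15 cells: n + m ≤ 15
  have hnm : n + m ≤ 15 := by
    by_cases hm0 : m = 0
    · omega
    have hq : pvInside (r0 + ((m - 1 : Nat) : Int) * dr) (c0 + ((m - 1 : Nat) : Int) * dc) = true :=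
      hm_min (m - 1) (by omega)
    have hstart : pvInside (r0 - (n : Int) * dr) (c0 - (n : Int) * dc) = true := by
      by_cases hn0 : n = 0
      · rw [hn0]; simpa using hm_min 0 (by omega)
      · have h := hn_min (n - 1) (by omega)
        have e1 : r0 - (((n - 1 : Nat) : Int) + 1) * dr = r0 - (n : Int) * dr := by
          have e : ((n - 1 : Nat) : Int) = (n : Int) - 1 := by omega
          rw [e]; ring
        have e2 : c0 - (((n - 1 : Nat) : Int) + 1) * dc = c0 - (n : Int) * dc := by
          have e : ((n - 1 : Nat) : Int) = (n : Int) - 1 := by omega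
          rw [e]; ring
        rw [e1, e2] at h; exact h
    by_contra hgt
    push Not at hgt
    simp only [pvInside, Bool.and_eq_true, decide_eq_true_eq] at hq hstart
    have hcast1 : ((m - 1 : Nat) : Int) = (m : Int) - 1 := by omega
    have hcast2 : ((n + m - 1 : Nat) : Int) = (n : Int) + (m : Int) - 1 := by omega
    have hdr : dr = 0 := by
      refine mul_window (n + m - 1) dr (by omega) ?_ ?_
      · rw [hcast2]; rw [hcast1] at hq; nlinarith [hq.1.1.1, hq.1.1.2, hstart.1.1.1, hstart.1.1.2]
      · rw [hcast2]; rw [hcast1] at hq; nlinarith [hq.1.1.1, hq.1.1.2, hstart.1.1.1, hstart.1.1.2]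
    have hdc : dc = 0 := by
      refine mul_window (n + m - 1) dc (by omega) ?_ ?_
      · rw [hcast2]; rw [hcast1] at hq; nlinarith [hq.1.2, hq.2, hstart.1.2, hstart.2]
      · rw [hcast2]; rw [hcast1] at hq; nlinarith [hq.1.2, hq.2, hstart.1.2, hstart.2]
    -- with a zero step, minimality forces n = m = 0, contradicting 15 < n + m
    subst hdr hdc
    have h0 : pvInside (r0 + ((0 : Nat) : Int) * 0) (c0 + ((0 : Nat) : Int) * 0) = false := by
      have h := hm_exit; simpa using h
    have : m ≤ 0 := Nat.find_min' hQex (by simpa using h0)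
    omega
  -- rewrite A by the closed forms
  rw [pvBackA_closed dr dc n 16 r0 c0 hn_min hn_exit (by omega)]
  rw [pvFwdA_closed dr dc r0 c0 (n + m) 16 (r0 - (n : Int) * dr) (c0 - (n : Int) * dc) [] 0
    (by
      intro j hj
      rcases lt_or_ge j n with hjn | hjn
      · have h := hn_min (n - 1 - j) (by omega)
        have e1 : r0 - (n : Int) * dr + (j : Int) * dr = r0 - (((n - 1 - j : Nat) : Int) + 1) * dr := by
          have : ((n - 1 - j : Nat) : Int) = (n : Int) - 1 - (j : Int) := by omega
          rw [this]; ring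
        have e2 : c0 - (n : Int) * dc + (j : Int) * dc = c0 - (((n - 1 - j : Nat) : Int) + 1) * dc := by
          have : ((n - 1 - j : Nat) : Int) = (n : Int) - 1 - (j : Int) := by omega
          rw [this]; ring
        rw [e1, e2]; exact h
      · have h := hm_min (j - n) (by omega)
        have e1 : r0 - (n : Int) * dr + (j : Int) * dr = r0 + ((j - n : Nat) : Int) * dr := by
          have : ((j - n : Nat) : Int) = (j : Int) - (n : Int) := by omega
          rw [this]; ring
        have e2 : c0 - (n : Int) * dc + (j : Int) * dc = c0 + ((j - n : Nat) : Int) * dc := by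
          have : ((j - n : Nat) : Int) = (j : Int) - (n : Int) := by omega
          rw [this]; ring
        rw [e1, e2]; exact h)
    (by
      have e1 : r0 - (n : Int) * dr + ((n + m : Nat) : Int) * dr = r0 + (m : Int) * dr := by push_cast; ring
      have e2 : c0 - (n : Int) * dc + ((n + m : Nat) : Int) * dc = c0 + (m : Int) * dc := by push_cast; ring
      rw [e1, e2]; exact hm_exit)
    (by omega)]
  -- rewrite B by the closed forms
  rw [pvBackB_closed dr dc n 16 (r0 - dr) (c0 - dc) []
    (by
      intro j hj
      have h := hn_min j hj
      have e1 : r0 - dr - (j : Int) * dr = r0 - ((j : Int) + 1) * dr := by ring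
      have e2 : c0 - dc - (j : Int) * dc = c0 - ((j : Int) + 1) * dc := by ring
      rw [e1, e2]; exact h)
    (by
      have e1 : r0 - dr - (n : Int) * dr = r0 - ((n : Int) + 1) * dr := by ring
      have e2 : c0 - dc - (n : Int) * dc = c0 - ((n : Int) + 1) * dc := by ring
      rw [e1, e2]; exact hn_exit)
    (by omega)]
  rw [pvFwdB_closed dr dc m 16 r0 c0 [] hm_min hm_exit (by omega)]
  simp only [List.nil_append, List.length_nil, Nat.cast_zero]
  -- move_pos: the fold picks index n exactly when the move cell is on the board (m > 0)
  by_cases hs : dr = 0 ∧ dc = 0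
  · -- zero step and move cell off the board: n = m = 0, both sides are ([], 0)
    obtain ⟨rfl, rfl⟩ := hs
    have hoff : pvInside r0 c0 = false := by
      rcases h : pvInside r0 c0 with _ | _
      · rfl
      exfalso
      simp only [pvInside, Bool.and_eq_true, decide_eq_true_eq] at h
      exact hpre ⟨rfl, rfl, by omega, by omega⟩
    have hm0 : m = 0 := by
      have : m ≤ 0 := Nat.find_min' hQex (by simpa using hoff)
      omega
    have hn0 : n = 0 := by
      have : n ≤ 0 := Nat.find_min' hPex (by simpa using hoff)
      omega
    rw [hm0, hn0]
    simp
  · have hGfun : (fun (a : Int) (j : Nat) =>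
        if r0 - (n : Int) * dr + (j : Int) * dr = r0 ∧ c0 - (n : Int) * dc + (j : Int) * dc = c0
        then ((0 : Int) + (j : Int)) else a)
        = (fun (a : Int) (j : Nat) => if j = n then ((0 : Int) + (j : Int)) else a) := by
      funext a j
      by_cases hj : j = n
      · subst hj
        rw [if_pos (by constructor <;> ring), if_pos rfl]
      · rw [if_neg ?_, if_neg hj]
        rintro ⟨h1', h2'⟩
        apply hs
        constructor
        · have h3 : ((j : Int) - (n : Int)) * dr = 0 := by nlinarith [h1']
          rcases mul_eq_zero.mp h3 with h4 | h4
          · exfalso; apply hj; omega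
          · exact h4
        · have h3 : ((j : Int) - (n : Int)) * dc = 0 := by nlinarith [h2']
          rcases mul_eq_zero.mp h3 with h4 | h4
          · exfalso; apply hj; omega
          · exact h4
    rw [hGfun, foldl_pick n (fun j : Nat => (0 : Int) + (j : Int)) (n + m) 0]
    rw [split_range_map dr dc r0 c0 n m]
    by_cases hm0 : m = 0
    · rw [hm0]
      simp
    · rw [if_pos (by omega)]
      have hne : ((List.range m).map (fun j : Nat => (r0 + (j : Int) * dr) * 15 + (c0 + (j : Int) * dc))).isEmpty = false := by
        simp
        omega
      rw [hne]
      simp
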